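-- pv_equiv track=rewrite | github.com/sheelabhadra/LeetCode-Python | 1138_Alphabet_Board_Path.py | alphabetBoardPath
-- ===== SOURCE A (Python) =====
-- def alphabetBoardPath(target: str) -> str:
--     res = []
--     start = [0, 0]
--     flag_z = False
--     for ch in target:
--         r = (ord(ch) - 97)//5
--         c = (ord(ch) - 97)%5
--
--         # character "z" - special case
--         if ch == "z":
--             r -= 1
--
--         # manhattan distance
--         moves_r = r - start[0]
--         moves_c = c - start[1]
--
--         if flag_z:
--             if ch == "z":
--                 res.append("!")
--                 continue
--             if moves_r <= 0:
--                 res.append("U")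
--                 flag_z = False
--
--         if moves_r > 0:
--             res.extend(["D"]*moves_r)
--         elif moves_r < 0:
--             res.extend(["U"]*abs(moves_r))
--
--         if moves_c > 0:
--             res.extend(["R"]*moves_c)
--         elif moves_c < 0:
--             res.extend(["L"]*abs(moves_c))
--
--         if ch == "z" and moves_r >= 0:
--             flag_z = True
--             res.append("D")
--
--         if moves_r == 0 and moves_c == 0 and ch != "z":
--             res.append("!")
--             continue
--
--         res.append("!")
--         start = [r, c]
--
--     return ''.join(res)
-- ===== SOURCE B (Python) =====
-- def alphabetBoardPath(target: str) -> str: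
--     # Stateless pairwise decomposition: the path is the concatenation of
--     # independent segments between consecutive characters (previous char IS
--     # the cursor), vertical-before-horizontal, with z entered via a final 'D'
--     # and left via a leading 'U'.
--     def seg(a, b):
--         if a == 'z' and b == 'z':
--             return '!'
--         r1, c1 = divmod(ord(a) - 97, 5)
--         r2, c2 = divmod(ord(b) - 97, 5)
--         pre = ''
--         if a == 'z':
--             pre, r1 = 'U', 4
--         suf = ''
--         if b == 'z':
--             suf, r2 = 'D', 4
--         vert = 'U' * (r1 - r2) if r2 < r1 else 'D' * (r2 - r1)
--         horiz = 'L' * (c1 - c2) if c2 < c1 else 'R' * (c2 - c1)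
--         return pre + vert + horiz + suf + '!'
--     return ''.join(seg(a, b) for a, b in zip('a' + target, target))
-- ===== Notes on version B (the rewrite author's own statement) =====
-- stated objective: alternative
-- what changed: Replaced A's stateful loop (mutable cursor, flag_z state machine) by a stateless pairwise decomposition: the answer is the concatenation of independent segments seg(a,b) mapped over consecutive character pairs zip('a'+target, target), each segment computed purely from the two characters (z left via a leading 'U', entered via a trailing 'D'). …
-- outside the precondition, e.g. on alphabetBoardPath('z~'): A returns 'DDDDD!DRRRR!', B returns 'DDDDD!UDRRRR!'; on alphabetBoardPath('~z'): A returns 'DDDDDRRRR!ULLLL!', B returns 'DDDDDRRRR!ULLLLD!'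
import Mathlib
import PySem

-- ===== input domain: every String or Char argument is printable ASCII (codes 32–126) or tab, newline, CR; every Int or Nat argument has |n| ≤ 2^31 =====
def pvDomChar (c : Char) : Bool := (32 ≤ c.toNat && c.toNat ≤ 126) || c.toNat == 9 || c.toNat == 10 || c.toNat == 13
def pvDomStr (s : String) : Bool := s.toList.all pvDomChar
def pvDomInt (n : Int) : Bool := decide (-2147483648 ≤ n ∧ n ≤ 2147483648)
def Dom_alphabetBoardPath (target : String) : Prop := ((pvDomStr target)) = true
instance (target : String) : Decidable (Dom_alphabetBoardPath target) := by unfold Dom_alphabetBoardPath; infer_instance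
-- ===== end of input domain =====

-- B replaces A's stateful loop (mutable cursor, flag_z state machine) by a stateless map of
-- per-pair segments over consecutive characters; objective: alternative (same cost).

-- ===== PORT A =====
-- literal transliteration of A: res accumulator, start = [r, c] (row of 'z' stored adjusted to 4), flag_z
def goA : List Char → List Char → Int × Int → Bool → List Char
  | [], res, _, _ => res
  | ch :: rest, res, (sr, sc), flagz =>
    let r0 : Int := PySem.Int.floordiv ((ch.toNat : Int) - 97) 5
    let c  : Int := PySem.Int.mod ((ch.toNat : Int) - 97) 5
    let r  : Int := if ch = 'z' then r0 - 1 else r0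
    let mr : Int := r - sr
    let mc : Int := c - sc
    if flagz ∧ ch = 'z' then
      goA rest (res ++ ['!']) (sr, sc) flagz
    else
      let st1 : List Char × Bool :=
        if flagz ∧ mr ≤ 0 then (res ++ ['U'], false) else (res, flagz)
      let res1 := st1.1
      let fz1 := st1.2
      let res2 :=
        if mr > 0 then res1 ++ List.replicate mr.toNat 'D'
        else if mr < 0 then res1 ++ List.replicate (-mr).toNat 'U'
        else res1
      let res3 :=
        if mc > 0 then res2 ++ List.replicate mc.toNat 'R'
        else if mc < 0 then res2 ++ List.replicate (-mc).toNat 'L'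
        else res2
      let st2 : List Char × Bool :=
        if ch = 'z' ∧ mr ≥ 0 then (res3 ++ ['D'], true) else (res3, fz1)
      let res4 := st2.1
      let fz2 := st2.2
      if mr = 0 ∧ mc = 0 ∧ ch ≠ 'z' then
        goA rest (res4 ++ ['!']) (sr, sc) fz2
      else
        goA rest (res4 ++ ['!']) (r, c) fz2

def alphabetBoardPath (target : String) : String :=
  String.ofList (goA target.toList [] (0, 0) false)

-- ===== PORT B =====
-- B: one independent segment per consecutive character pair (no loop state);
-- 'z' is left via a leading 'U' and entered via a trailing 'D'
def segB (a b : Char) : List Char :=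
  if a = 'z' ∧ b = 'z' then ['!']
  else
    let r1 : Int := PySem.Int.floordiv ((a.toNat : Int) - 97) 5
    let c1 : Int := PySem.Int.mod ((a.toNat : Int) - 97) 5
    let r2 : Int := PySem.Int.floordiv ((b.toNat : Int) - 97) 5
    let c2 : Int := PySem.Int.mod ((b.toNat : Int) - 97) 5
    let pre : List Char := if a = 'z' then ['U'] else []
    let r1 : Int := if a = 'z' then 4 else r1
    let suf : List Char := if b = 'z' then ['D'] else []
    let r2 : Int := if b = 'z' then 4 else r2
    let vert : List Char :=
      if r2 < r1 then List.replicate (r1 - r2).toNat 'U' else List.replicate (r2 - r1).toNat 'D'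
    let horiz : List Char :=
      if c2 < c1 then List.replicate (c1 - c2).toNat 'L' else List.replicate (c2 - c1).toNat 'R'
    pre ++ vert ++ horiz ++ suf ++ ['!']

def alphabetBoardPath_alt (target : String) : String :=
  String.ofList ((((('a' :: target.toList).zip target.toList)).map (fun p => segB p.1 p.2)).flatten)

-- ===== PRECONDITION & SPEC =====
-- a pair of adjacent characters that puts 'z' next to an off-board row-5 character '{','|','}','~'
def pvBadPair (x y : Char) : Bool :=
  (x = 'z' && 123 ≤ y.toNat && y.toNat ≤ 126) || (123 ≤ x.toNat && x.toNat ≤ 126 && y = 'z')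

def pvOkList : List Char → Bool
  | x :: y :: rest => !pvBadPair x y && pvOkList (y :: rest)
  | _ => true

-- Pre_ excludes only targets in which 'z' is immediately adjacent to an off-board character
-- '{','|','}','~' (their computed position, board row 5, collides with z's): on such pairs A's
-- flag_z bookkeeping makes accidental, unspecifiable choices, so neither value is the one to match.
def Pre_alphabetBoardPath (target : String) : Prop :=
  pvOkList target.toList = true
instance (target : String) : Decidable (Pre_alphabetBoardPath target) := by
  unfold Pre_alphabetBoardPath; infer_instance
def pvWitness_alphabetBoardPath : String := "leetz"

def Spec_alphabetBoardPath (target : String) (out : String) : Prop := out = alphabetBoardPath_alt target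
instance (target : String) (out : String) : Decidable (Spec_alphabetBoardPath target out) := by unfold Spec_alphabetBoardPath; infer_instance

-- ===== CLAIM (what is proved, stated in full; the proofs are below) =====
def Claim_equal_alphabetBoardPath : Prop := ∀ (target : String), Dom_alphabetBoardPath target → Pre_alphabetBoardPath target → Spec_alphabetBoardPath target (alphabetBoardPath target)

-- ===== LEMMAS AND PROOFS =====

-- B's reading of A's cursor: the position A stores after processing a character
def posAdj (ch : Char) : Int × Int :=
  if ch = 'z' then (4, 0)
  else (PySem.Int.floordiv ((ch.toNat : Int) - 97) 5, PySem.Int.mod ((ch.toNat : Int) - 97) 5)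

theorem char_eq_of_toNat (a b : Char) (h : a.toNat = b.toNat) : a = b := by
  apply Char.ext
  exact UInt32.toNat_inj.mp h

theorem okList_cons (x : Char) (l : List Char) (h : pvOkList (x :: l) = true) :
    pvOkList l = true ∧ ∀ y ∈ l.head?, pvBadPair x y = false := by
  cases l with
  | nil => exact ⟨rfl, by simp⟩
  | cons y rest =>
    simp only [pvOkList, Bool.and_eq_true, Bool.not_eq_true'] at h
    exact ⟨h.2, by simpa using h.1⟩

theorem badPair_z (y : Char) (h : pvBadPair 'z' y = false) :
    ¬(123 ≤ y.toNat ∧ y.toNat ≤ 126) := by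
  intro hc
  rw [show pvBadPair 'z' y = true by simp [pvBadPair, hc.1, hc.2]] at h
  exact Bool.noConfusion h

theorem badPair_to_z (x : Char) (h : pvBadPair x 'z' = false) :
    ¬(123 ≤ x.toNat ∧ x.toNat ≤ 126) := by
  intro hc
  rw [show pvBadPair x 'z' = true by simp [pvBadPair, hc.1, hc.2]] at h
  exact Bool.noConfusion h

-- A's two-branch move emission equals B's one-branch form
theorem emit_eq (x : List Char) (m : Int) (a b : Char) :
    (if m > 0 then x ++ List.replicate m.toNat b
     else if m < 0 then x ++ List.replicate (-m).toNat a else x)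
  = x ++ (if m < 0 then List.replicate (-m).toNat a else List.replicate m.toNat b) := by
  rcases lt_trichotomy m 0 with h | h | h
  · rw [if_neg (by omega), if_pos h, if_pos h]
  · subst h; simp
  · rw [if_pos h, if_neg (by omega)]

-- A's two-branch replicate choice re-expressed by comparing the two coordinates directly
theorem branch_eq (p q : Int) (a b : Char) :
    (if p - q < 0 then List.replicate (-(p - q)).toNat a else List.replicate (p - q).toNat b)
  = (if p < q then List.replicate (q - p).toNat a else List.replicate (p - q).toNat b) := by
  by_cases h : p < q
  · rw [if_pos (by omega), if_pos h]; congr 1; omega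
  · rw [if_neg (by omega), if_neg h]

theorem goA_eq_seg (l res : List Char) (prev : Char)
    (hdom : ∀ c ∈ prev :: l, c.toNat ≤ 126)
    (hok : pvOkList (prev :: l) = true) :
    goA l res (posAdj prev) (prev == 'z')
      = res ++ (((prev :: l).zip l).map (fun p => segB p.1 p.2)).flatten := by
  induction l generalizing res prev with
  | nil => simp [goA]
  | cons ch rest ih =>
    have hch : ch.toNat ≤ 126 := hdom ch (by simp)
    have hdrest : ∀ c ∈ ch :: rest, c.toNat ≤ 126 := by
      intro c hc; exact hdom c (by simp at hc ⊢; tauto)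
    obtain ⟨hokr, hpair⟩ := okList_cons prev (ch :: rest) hok
    have hbad : pvBadPair prev ch = false := hpair ch (by simp)
    have hbc : ((ch.toNat : Int)) ≤ 126 := by exact_mod_cast hch
    have hstep : goA (ch :: rest) res (posAdj prev) (prev == 'z')
        = goA rest (res ++ segB prev ch) (posAdj ch) (ch == 'z') := by
      by_cases hp : prev = 'z' <;> by_cases hz : ch = 'z'
      · -- z after z
        subst hp; subst hz
        simp [goA, segB, posAdj]
      · -- leaving z
        subst hp
        have hne : ch.toNat ≠ 122 := fun h => hz (char_eq_of_toNat _ _ h)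
        have hnothigh := badPair_z ch hbad
        have hle : ch.toNat ≤ 121 := by omega
        have hble : ((ch.toNat : Int)) ≤ 121 := by exact_mod_cast hle
        have hfd : PySem.Int.floordiv ((ch.toNat : Int) - 97) 5 = ((ch.toNat : Int) - 97) / 5 :=
          PySem.Int.floordiv_eq_ediv_of_pos (by norm_num)
        have hmd : PySem.Int.mod ((ch.toNat : Int) - 97) 5 = ((ch.toNat : Int) - 97) % 5 :=
          PySem.Int.mod_eq_emod_of_pos (by norm_num)
        have hz' : (ch = 'z') = False := by simp [hz]
        have hbeq : (ch == 'z') = false := by simp [hz]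
        have hcz : PySem.Int.mod ((('z').toNat : Int) - 97) 5 = 0 := by decide
        simp only [goA, segB, posAdj, hz', hbeq, hfd, hmd, hcz, if_true, if_false,
          and_false, false_and, and_true, true_and, beq_self_eq_true, not_false_iff, ne_eq]
        rw [if_pos (show ((ch.toNat : Int) - 97) / 5 - 4 ≤ 0 from by omega)]
        rw [emit_eq, emit_eq, branch_eq, branch_eq]
        by_cases hsh : ((ch.toNat : Int) - 97) / 5 - 4 = 0 ∧ ((ch.toNat : Int) - 97) % 5 - 0 = 0
        · rw [if_pos hsh]
          rw [show ((ch.toNat : Int) - 97) / 5 = 4 from by omega,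
              show ((ch.toNat : Int) - 97) % 5 = 0 from by omega]
          simp [List.append_assoc]
        · rw [if_neg hsh]
          simp [List.append_assoc]
      · -- entering z
        subst hz
        have hne : prev.toNat ≠ 122 := fun h => hp (char_eq_of_toNat _ _ h)
        have hnothigh := badPair_to_z prev hbad
        have hprevle : prev.toNat ≤ 126 := hdom prev (by simp)
        have hle : prev.toNat ≤ 121 := by omega
        have hble : ((prev.toNat : Int)) ≤ 121 := by exact_mod_cast hle
        have hfd : PySem.Int.floordiv ((prev.toNat : Int) - 97) 5 = ((prev.toNat : Int) - 97) / 5 :=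
          PySem.Int.floordiv_eq_ediv_of_pos (by norm_num)
        have hmd : PySem.Int.mod ((prev.toNat : Int) - 97) 5 = ((prev.toNat : Int) - 97) % 5 :=
          PySem.Int.mod_eq_emod_of_pos (by norm_num)
        have hp' : (prev = 'z') = False := by simp [hp]
        have hbeq : (prev == 'z') = false := by simp [hp]
        have hfz : PySem.Int.floordiv ((('z').toNat : Int) - 97) 5 = 5 := by decide
        have hcz : PySem.Int.mod ((('z').toNat : Int) - 97) 5 = 0 := by decide
        simp only [goA, segB, posAdj, hp', hbeq, hfd, hmd, hfz, hcz, if_true, if_false,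
          and_true, true_and, beq_self_eq_true, ne_eq]
        rw [emit_eq, emit_eq, branch_eq, branch_eq]
        rw [if_pos (show ((5:Int) - 1) - ((prev.toNat : Int) - 97) / 5 ≥ 0 from by omega)]
        simp [List.append_assoc]
      · -- ordinary pair
        have hfdp : PySem.Int.floordiv ((prev.toNat : Int) - 97) 5 = ((prev.toNat : Int) - 97) / 5 :=
          PySem.Int.floordiv_eq_ediv_of_pos (by norm_num)
        have hmdp : PySem.Int.mod ((prev.toNat : Int) - 97) 5 = ((prev.toNat : Int) - 97) % 5 :=
          PySem.Int.mod_eq_emod_of_pos (by norm_num)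
        have hfd : PySem.Int.floordiv ((ch.toNat : Int) - 97) 5 = ((ch.toNat : Int) - 97) / 5 :=
          PySem.Int.floordiv_eq_ediv_of_pos (by norm_num)
        have hmd : PySem.Int.mod ((ch.toNat : Int) - 97) 5 = ((ch.toNat : Int) - 97) % 5 :=
          PySem.Int.mod_eq_emod_of_pos (by norm_num)
        have hp' : (prev = 'z') = False := by simp [hp]
        have hz' : (ch = 'z') = False := by simp [hz]
        have hbeqp : (prev == 'z') = false := by simp [hp]
        have hbeq : (ch == 'z') = false := by simp [hz]
        simp only [goA, segB, posAdj, hp', hz', hbeqp, hbeq, hfdp, hmdp, hfd, hmd,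
          if_false, and_false, false_and, and_true, not_false_iff, ne_eq]
        rw [emit_eq, emit_eq, branch_eq, branch_eq]
        by_cases hsh : ((ch.toNat : Int) - 97) / 5 - ((prev.toNat : Int) - 97) / 5 = 0 ∧
            ((ch.toNat : Int) - 97) % 5 - ((prev.toNat : Int) - 97) % 5 = 0
        · rw [if_pos hsh]
          rw [show ((ch.toNat : Int) - 97) / 5 = ((prev.toNat : Int) - 97) / 5 from by omega,
              show ((ch.toNat : Int) - 97) % 5 = ((prev.toNat : Int) - 97) % 5 from by omega]
          simp
        · rw [if_neg hsh]
          simp [List.append_assoc]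
    rw [hstep, ih (res ++ segB prev ch) ch hdrest hokr]
    simp [List.zip_cons_cons]

-- ===== VERDICT (by name: the statement is the Claim_ definition above) =====
theorem alphabetBoardPath_spec : Claim_equal_alphabetBoardPath := by
  intro target hdom hpre
  unfold Spec_alphabetBoardPath alphabetBoardPath alphabetBoardPath_alt
  have hdom' : ∀ c ∈ 'a' :: target.toList, c.toNat ≤ 126 := by
    intro c hc
    rcases List.mem_cons.mp hc with h | h
    · subst h; decide
    · have := List.all_eq_true.mp hdom c h
      simp only [pvDomChar, Bool.or_eq_true, Bool.and_eq_true, decide_eq_true_eq, beq_iff_eq] at this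
      omega
  have hok' : pvOkList ('a' :: target.toList) = true := by
    cases htl : target.toList with
    | nil => rfl
    | cons y rest =>
      have hb : pvBadPair 'a' y = false := by
        simp [pvBadPair]
      have hrest : pvOkList (y :: rest) = true := by
        rw [← htl]; exact hpre
      simp [pvOkList, hb, hrest]
  have := goA_eq_seg target.toList [] 'a' hdom' hok'
  rw [show posAdj 'a' = (0, 0) from by decide, show ('a' == 'z') = false from by decide] at this
  rw [this]
  simp
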